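-- pv_equiv track=rewrite | github.com/nickest14/Leetcode-python | python/easy/Solution_1550.py | threeConsecutiveOdds
-- ===== SOURCE A (Python) =====
-- from typing import List
--
-- def threeConsecutiveOdds(arr: List[int]) -> bool:
--     count = 0
--     for i in arr:
--         if i % 2 == 1:
--             count += 1
--         else:
--             count = 0
--         if count == 3:
--             return True
--     return False
-- ===== SOURCE B (Python) =====
-- def threeConsecutiveOdds(arr):
--     for i in range(len(arr) - 2):
--         if arr[i] % 2 == 1 and arr[i + 1] % 2 == 1 and arr[i + 2] % 2 == 1:
--             return True
--     return False
-- ===== Notes on version B (the rewrite author's own statement) =====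
-- stated objective: alternative
-- what changed: Replaces the running odd-counter reset on evens by a stateless scan over overlapping 3-windows, returning True on the first all-odd triple.
import Mathlib
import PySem

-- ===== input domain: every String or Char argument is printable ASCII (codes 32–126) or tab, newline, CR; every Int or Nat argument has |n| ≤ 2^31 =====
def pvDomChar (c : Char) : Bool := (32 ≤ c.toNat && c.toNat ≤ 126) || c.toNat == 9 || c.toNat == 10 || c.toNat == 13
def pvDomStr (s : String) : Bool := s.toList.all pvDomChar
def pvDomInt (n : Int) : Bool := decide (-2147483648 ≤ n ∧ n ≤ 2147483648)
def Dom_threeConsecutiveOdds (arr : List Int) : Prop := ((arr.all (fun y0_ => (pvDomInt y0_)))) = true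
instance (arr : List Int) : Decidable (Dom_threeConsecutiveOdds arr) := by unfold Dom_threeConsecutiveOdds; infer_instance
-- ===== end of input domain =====

-- B replaces A's running odd-counter (reset on evens) by a stateless scan of overlapping 3-windows; same cost, different decomposition.

-- ===== PORT A =====
-- A's loop carrying `count`, with the early `return True` as returning from the recursion.
def pvGoA : List Int → Int → Bool
  | [], _ => false
  | i :: rest, count =>
    let count' := if PySem.Int.mod i 2 == 1 then count + 1 else 0
    if count' == 3 then true else pvGoA rest count'

def threeConsecutiveOdds (arr : List Int) : Bool := pvGoA arr 0

-- ===== PORT B =====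
-- B's window loop: check each overlapping triple, first match wins.
def pvGoB : List Int → Bool
  | a :: b :: c :: rest =>
    if PySem.Int.mod a 2 == 1 && PySem.Int.mod b 2 == 1 && PySem.Int.mod c 2 == 1 then true
    else pvGoB (b :: c :: rest)
  | _ => false

def threeConsecutiveOdds_alt (arr : List Int) : Bool := pvGoB arr

-- ===== PRECONDITION & SPEC =====
def Spec_threeConsecutiveOdds (arr : List Int) (out : Bool) : Prop := out = threeConsecutiveOdds_alt arr
instance (arr : List Int) (out : Bool) : Decidable (Spec_threeConsecutiveOdds arr out) := by unfold Spec_threeConsecutiveOdds; infer_instance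

-- ===== CLAIM (what is proved, stated in full; the proofs are below) =====
def Claim_equal_threeConsecutiveOdds : Prop := ∀ (arr : List Int), Dom_threeConsecutiveOdds arr → Spec_threeConsecutiveOdds arr (threeConsecutiveOdds arr)

-- ===== LEMMAS AND PROOFS =====

-- head is odd
def pvOdd1 : List Int → Bool
  | a :: _ => PySem.Int.mod a 2 == 1
  | [] => false

-- first two elements are odd
def pvOdd2 : List Int → Bool
  | a :: rest => (PySem.Int.mod a 2 == 1) && pvOdd1 rest
  | [] => false

-- goB ignores an even head
theorem pvGoB_even_cons (x : Int) (r : List Int) (hx : ¬ (x % 2 = 1)) :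
    pvGoB (x :: r) = pvGoB r := by
  match r with
  | [] => simp [pvGoB]
  | [b] => simp [pvGoB]
  | b :: c :: rest => simp [pvGoB, hx]

-- goB ignores a head whose successor is even
theorem pvGoB_cons_even (x b : Int) (r : List Int) (hb : ¬ (b % 2 = 1)) :
    pvGoB (x :: b :: r) = pvGoB (b :: r) := by
  match r with
  | [] => simp [pvGoB]
  | c :: rest => simp [pvGoB, hb]

-- the counter invariant: goA with count 0/1/2 versus the window scan
theorem pvGoA_inv (l : List Int) :
    pvGoA l 0 = pvGoB l ∧ pvGoA l 1 = (pvOdd2 l || pvGoB l) ∧ pvGoA l 2 = (pvOdd1 l || pvGoB l) := by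
  induction l with
  | nil => simp [pvGoA, pvGoB, pvOdd1, pvOdd2]
  | cons x r ih =>
    obtain ⟨ih0, ih1, ih2⟩ := ih
    by_cases hx : x % 2 = 1
    · refine ⟨?_, ?_, ?_⟩
      · -- count 0, odd head → count 1
        show pvGoA (x :: r) 0 = pvGoB (x :: r)
        rw [show pvGoA (x :: r) 0 = pvGoA r 1 by simp [pvGoA, hx], ih1]
        match r with
        | [] => simp [pvGoB, pvOdd2]
        | [b] => simp [pvGoB, pvOdd2, pvOdd1]
        | b :: c :: rest =>
          by_cases hb : b % 2 = 1
          · by_cases hc : c % 2 = 1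
            · simp [pvGoB, pvOdd2, pvOdd1, hx, hb, hc]
            · simp [pvGoB, pvOdd2, pvOdd1, hx, hb, hc]
          · rw [pvGoB_cons_even x b (c :: rest) hb]
            simp [pvOdd2, pvOdd1, hb]
      · -- count 1, odd head → count 2
        show pvGoA (x :: r) 1 = (pvOdd2 (x :: r) || pvGoB (x :: r))
        rw [show pvGoA (x :: r) 1 = pvGoA r 2 by simp [pvGoA, hx], ih2]
        have hodd2 : pvOdd2 (x :: r) = pvOdd1 r := by simp [pvOdd2, hx]
        rw [hodd2]
        by_cases h1 : pvOdd1 r = true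
        · simp [h1]
        · have hgb : pvGoB (x :: r) = pvGoB r := by
            match r with
            | [] => simp [pvGoB]
            | [b] => simp [pvGoB]
            | b :: c :: rest =>
              have hb : ¬ (b % 2 = 1) := by
                intro h; exact h1 (by simp [pvOdd1, h])
              exact pvGoB_cons_even x b (c :: rest) hb
          simp [hgb, h1]
      · -- count 2, odd head → count 3 → True
        show pvGoA (x :: r) 2 = (pvOdd1 (x :: r) || pvGoB (x :: r))
        simp [pvGoA, pvOdd1, hx]
    · -- even head: counter resets; window at head fails
      have hgb := pvGoB_even_cons x r hx
      have hstep : ∀ c : Int, pvGoA (x :: r) c = pvGoA r 0 := by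
        intro c; simp [pvGoA, hx]
      refine ⟨?_, ?_, ?_⟩
      · rw [hstep 0, ih0, hgb]
      · rw [hstep 1, ih0, hgb]; simp [pvOdd2, hx]
      · rw [hstep 2, ih0, hgb]; simp [pvOdd1, hx]

-- ===== VERDICT (by name: the statement is the Claim_ definition above) =====
theorem threeConsecutiveOdds_spec : Claim_equal_threeConsecutiveOdds := by
  intro arr _
  show threeConsecutiveOdds arr = threeConsecutiveOdds_alt arr
  exact (pvGoA_inv arr).1
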